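-- pv_equiv track=rewrite | github.com/Skinla/project | dreamteamcompany/local/handlers/dozvon/lead_callback/generate_bpt.py | make_set_field
-- ===== SOURCE A (Python) =====
-- def php_s(value: str) -> str:
--     b = value.encode('utf-8')
--     return f's:{len(b)}:"{value}";'
--
-- def php_int(value: int) -> str:
--     return f'i:{value};'
--
-- def php_null() -> str:
--     return 'N;'
--
-- def php_array(items: list[tuple[str, str]]) -> str:
--     parts = [f'a:{len(items)}:{{']
--     for key, val in items:
--         parts.append(key)
--         parts.append(val)
--     parts.append('}')
--     return ''.join(parts)
--
-- def php_array_indexed(items: list[str]) -> str: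
--     pairs = []
--     for i, val in enumerate(items):
--         pairs.append((php_int(i), val))
--     return php_array(pairs)
--
-- def make_activity(act_type: str, name: str, activated: str,
--                   properties: list[tuple[str, str]],
--                   children: list[str] | None = None) -> str:
--     parts = [
--         (php_s('Type'), php_s(act_type)),
--         (php_s('Name'), php_s(name)),
--         (php_s('Activated'), php_s(activated)),
--         (php_s('Node'), php_null()),
--         (php_s('Properties'), php_array(properties)),
--         (php_s('Children'), php_array_indexed(children or [])),
--     ]
--     return php_array(parts)
--
-- def make_set_field(name: str, title: str, field_values: dict[str, str]) -> str:
--     items = [(php_s(k), php_s(v)) for k, v in field_values.items()]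
--     return make_activity('SetFieldActivity', name, 'Y', [
--         (php_s('FieldValue'), php_array(items)),
--         (php_s('ModifiedBy'), php_array_indexed([php_s('user_1')])),
--         (php_s('MergeMultipleFields'), php_s('N')),
--         (php_s('Title'), php_s(title)),
--         (php_s('EditorComment'), php_s('')),
--     ])
-- ===== SOURCE B (Python) =====
-- def make_set_field(name: str, title: str, field_values: dict[str, str]) -> str:
--     def serialize(obj) -> str:
--         if obj is None:
--             return 'N;'
--         if isinstance(obj, int):
--             return f'i:{obj};'
--         if isinstance(obj, str):
--             return f's:{len(obj.encode("utf-8"))}:"{obj}";'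
--         if isinstance(obj, list):
--             body = ''.join(serialize(i) + serialize(v) for i, v in enumerate(obj))
--             return f'a:{len(obj)}:{{{body}}}'
--         # dict: associative array in insertion order
--         body = ''.join(serialize(k) + serialize(v) for k, v in obj.items())
--         return f'a:{len(obj)}:{{{body}}}'
--
--     return serialize({
--         'Type': 'SetFieldActivity',
--         'Name': name,
--         'Activated': 'Y',
--         'Node': None,
--         'Properties': {
--             'FieldValue': dict(field_values),
--             'ModifiedBy': ['user_1'],
--             'MergeMultipleFields': 'N',
--             'Title': title,
--             'EditorComment': '',
--         },
--         'Children': [],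
--     })
-- ===== Notes on version B (the rewrite author's own statement) =====
-- stated objective: idiomatic
-- what changed: Replaces A's family of bottom-up fragment-concatenation helpers (php_s/php_int/php_array/php_array_indexed/make_activity) by one recursive type-dispatched serializer applied top-down to a single nested dict/list literal mirroring the activity.
import Mathlib
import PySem

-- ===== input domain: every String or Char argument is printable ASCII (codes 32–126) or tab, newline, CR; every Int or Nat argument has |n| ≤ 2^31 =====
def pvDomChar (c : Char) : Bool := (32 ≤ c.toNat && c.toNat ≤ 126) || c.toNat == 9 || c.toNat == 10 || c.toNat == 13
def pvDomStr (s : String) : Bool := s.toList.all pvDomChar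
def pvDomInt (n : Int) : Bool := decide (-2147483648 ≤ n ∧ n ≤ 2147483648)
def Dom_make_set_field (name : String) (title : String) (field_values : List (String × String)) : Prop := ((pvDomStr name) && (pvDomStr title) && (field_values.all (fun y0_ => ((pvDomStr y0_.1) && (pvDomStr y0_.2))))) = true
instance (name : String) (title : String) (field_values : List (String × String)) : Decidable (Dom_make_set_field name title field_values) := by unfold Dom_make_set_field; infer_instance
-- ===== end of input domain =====

-- B replaces A's bottom-up fragment-concatenation helpers by one recursive type-dispatched
-- serializer over a single nested value mirroring the activity (objective: idiomatic).

-- ===== PORT A =====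
-- len(value.encode('utf-8')) : on the ASCII domain (Dom) the UTF-8 byte length equals the
-- character count, so PySem.Str.len is exact here.
def php_s (value : String) : String :=
  "s:" ++ PySem.Int.toStr (PySem.Str.len value) ++ ":\"" ++ value ++ "\";"

def php_int (value : Int) : String :=
  "i:" ++ PySem.Int.toStr value ++ ";"

def php_null : String := "N;"

def php_array (items : List (String × String)) : String :=
  let parts : List String := ["a:" ++ PySem.Int.toStr (items.length : Int) ++ ":{"]
  let parts := items.foldl (fun ps kv => ps ++ [kv.1, kv.2]) parts
  PySem.Str.join "" (parts ++ ["}"])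

def php_array_indexed (items : List String) : String :=
  let pairs := (PySem.List.enumerate items).foldl
    (fun ps iv => ps ++ [(php_int iv.1, iv.2)]) ([] : List (String × String))
  php_array pairs

def make_activity (act_type : String) (name : String) (activated : String)
    (properties : List (String × String)) (children : List String) : String :=
  let parts := [
    (php_s "Type", php_s act_type),
    (php_s "Name", php_s name),
    (php_s "Activated", php_s activated),
    (php_s "Node", php_null),
    (php_s "Properties", php_array properties),
    (php_s "Children", php_array_indexed children)
  ]
  php_array parts

def make_set_field (name : String) (title : String) (field_values : List (String × String)) : String :=
  let items := field_values.map (fun kv => (php_s kv.1, php_s kv.2))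
  make_activity "SetFieldActivity" name "Y" [
    (php_s "FieldValue", php_array items),
    (php_s "ModifiedBy", php_array_indexed [php_s "user_1"]),
    (php_s "MergeMultipleFields", php_s "N"),
    (php_s "Title", php_s title),
    (php_s "EditorComment", php_s "")
  ] []

-- ===== PORT B =====
-- One nested value type (mutual, to avoid a nested inductive) and a type-dispatched serializer.
mutual
inductive PhpVal : Type where
  | pstr : String → PhpVal
  | pint : Int → PhpVal
  | pnull : PhpVal
  | pdict : PhpPairs → PhpVal
  | plist : PhpList → PhpVal
inductive PhpPairs : Type where
  | nil : PhpPairs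
  | cons : String → PhpVal → PhpPairs → PhpPairs
inductive PhpList : Type where
  | nil : PhpList
  | cons : PhpVal → PhpList → PhpList
end

def pairsLen : PhpPairs → Int
  | .nil => 0
  | .cons _ _ r => pairsLen r + 1

def listLen : PhpList → Int
  | .nil => 0
  | .cons _ r => listLen r + 1

mutual
def serialize : PhpVal → String
  | .pnull => "N;"
  | .pint n => "i:" ++ PySem.Int.toStr n ++ ";"
  | .pstr s => "s:" ++ PySem.Int.toStr (PySem.Str.len s) ++ ":\"" ++ s ++ "\";"
  | .plist l => "a:" ++ PySem.Int.toStr (listLen l) ++ ":{" ++ serializeList 0 l ++ "}"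
  | .pdict p => "a:" ++ PySem.Int.toStr (pairsLen p) ++ ":{" ++ serializePairs p ++ "}"
def serializePairs : PhpPairs → String
  | .nil => ""
  -- the key is a str, so serialize(k) takes the str branch (inlined here for termination)
  | .cons k v rest =>
      ("s:" ++ PySem.Int.toStr (PySem.Str.len k) ++ ":\"" ++ k ++ "\";") ++
      serialize v ++ serializePairs rest
def serializeList : Int → PhpList → String
  | _, .nil => ""
  -- the index is an int, so serialize(i) takes the int branch (inlined here for termination)
  | i, .cons v rest =>
      ("i:" ++ PySem.Int.toStr i ++ ";") ++ serialize v ++ serializeList (i + 1) rest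
end

def pairsOf : List (String × String) → PhpPairs
  | [] => .nil
  | (k, v) :: r => .cons k (.pstr v) (pairsOf r)

def make_set_field_alt (name : String) (title : String) (field_values : List (String × String)) : String :=
  serialize (.pdict
    (.cons "Type" (.pstr "SetFieldActivity")
    (.cons "Name" (.pstr name)
    (.cons "Activated" (.pstr "Y")
    (.cons "Node" .pnull
    (.cons "Properties" (.pdict
      (.cons "FieldValue" (.pdict (pairsOf field_values))
      (.cons "ModifiedBy" (.plist (.cons (.pstr "user_1") .nil))
      (.cons "MergeMultipleFields" (.pstr "N")
      (.cons "Title" (.pstr title)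
      (.cons "EditorComment" (.pstr "") .nil))))))
    (.cons "Children" (.plist .nil) .nil)))))))

-- ===== PRECONDITION & SPEC =====
def Spec_make_set_field (name : String) (title : String) (field_values : List (String × String)) (out : String) : Prop := out = make_set_field_alt name title field_values
instance (name : String) (title : String) (field_values : List (String × String)) (out : String) : Decidable (Spec_make_set_field name title field_values out) := by unfold Spec_make_set_field; infer_instance

-- ===== CLAIM (what is proved, stated in full; the proofs are below) =====
def Claim_equal_make_set_field : Prop := ∀ (name : String) (title : String) (field_values : List (String × String)), Dom_make_set_field name title field_values → Spec_make_set_field name title field_values (make_set_field name title field_values)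

-- ===== LEMMAS AND PROOFS =====

theorem join_cons (a : String) (l : List String) :
    PySem.Str.join "" (a :: l) = a ++ PySem.Str.join "" l := by
  apply String.toList_injective
  cases l with
  | nil => simp [PySem.Str.join, PySem.Chars.join_singleton, PySem.Chars.join_nil]
  | cons b t => simp [PySem.Str.join, PySem.Chars.join_cons_cons]

theorem join_foldr (l : List String) :
    PySem.Str.join "" l = l.foldr (· ++ ·) "" := by
  induction l with
  | nil => decide
  | cons a t ih => rw [join_cons, ih, List.foldr_cons]

theorem flat_foldr (l : List (String × String)) (c : String) :
    List.foldr (· ++ ·) c (l.flatMap fun kv => [kv.1, kv.2]) =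
      l.foldr (fun kv s => kv.1 ++ kv.2 ++ s) c := by
  induction l with
  | nil => simp
  | cons kv t ih => simp [ih, String.append_assoc]

theorem foldr_pair_init (l : List (String × String)) (c d : String) :
    l.foldr (fun kv s => kv.1 ++ (kv.2 ++ s)) c ++ d =
      l.foldr (fun kv s => kv.1 ++ (kv.2 ++ s)) (c ++ d) := by
  induction l with
  | nil => rfl
  | cons kv t ih =>
      rw [List.foldr_cons, List.foldr_cons]
      simp only [String.append_assoc]
      rw [ih]

theorem php_array_eq (items : List (String × String)) :
    php_array items =
      "a:" ++ PySem.Int.toStr (items.length : Int) ++ ":{" ++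
        items.foldr (fun kv s => kv.1 ++ kv.2 ++ s) "" ++ "}" := by
  simp only [php_array]
  rw [PySem.List.foldl_append_eq_flatMap, join_foldr]
  simp [List.foldr_append, flat_foldr, String.append_assoc]
  rw [foldr_pair_init]
  simp

theorem pairsLen_pairsOf (l : List (String × String)) :
    pairsLen (pairsOf l) = (l.length : Int) := by
  induction l with
  | nil => rfl
  | cons kv t ih => simp [pairsOf, pairsLen, ih]

theorem serializePairs_pairsOf (l : List (String × String)) :
    serializePairs (pairsOf l) =
      l.foldr (fun kv s => php_s kv.1 ++ php_s kv.2 ++ s) "" := by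
  induction l with
  | nil => rfl
  | cons kv t ih => simp [pairsOf, serializePairs, serialize, php_s, ih, String.append_assoc]

-- ===== VERDICT (by name: the statement is the Claim_ definition above) =====
theorem make_set_field_spec : Claim_equal_make_set_field := by
  intro name title l _
  unfold Spec_make_set_field
  simp only [make_set_field_alt, serialize, serializePairs, serializeList, pairsLen, listLen,
    pairsLen_pairsOf, serializePairs_pairsOf]
  simp only [make_set_field, make_activity, php_array_indexed,
    PySem.List.enumerate_cons, PySem.List.enumerate_nil, List.foldl_cons, List.foldl_nil,
    php_array_eq, List.foldr_cons, List.foldr_nil, List.foldr_map, List.length_map]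
  simp [php_s, php_int, php_null, String.append_assoc]
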